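-- pv_equiv track=rewrite | github.com/sumit2798/GFG | hashing/XOR_pair.py | xorPair
-- ===== SOURCE A (Python) =====
-- def xorPair(arr, n, x):
--     result = 0
--     s = set()
--     for i in range(0, n):
--         if (x ^ arr[i] in s):
--             return True
--
--         s.add(arr[i])
--     return False
-- ===== SOURCE B (Python) =====
-- def xorPair(arr, n, x):
--     for i in range(n):
--         for j in range(i):
--             if arr[i] ^ arr[j] == x:
--                 return True
--     return False
-- ===== Notes on version B (the rewrite author's own statement) =====
-- stated objective: alternative
-- what changed: Replaces the hash-set single pass with a plain nested index loop (outer i, inner j over strictly earlier indices) that maintains no auxiliary structure and returns True on the first pair with arr[i]^arr[j]==x.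
-- outside the precondition, e.g. on xorPair([1, 2], 5, 3): A returns True, B returns True
import Mathlib
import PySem

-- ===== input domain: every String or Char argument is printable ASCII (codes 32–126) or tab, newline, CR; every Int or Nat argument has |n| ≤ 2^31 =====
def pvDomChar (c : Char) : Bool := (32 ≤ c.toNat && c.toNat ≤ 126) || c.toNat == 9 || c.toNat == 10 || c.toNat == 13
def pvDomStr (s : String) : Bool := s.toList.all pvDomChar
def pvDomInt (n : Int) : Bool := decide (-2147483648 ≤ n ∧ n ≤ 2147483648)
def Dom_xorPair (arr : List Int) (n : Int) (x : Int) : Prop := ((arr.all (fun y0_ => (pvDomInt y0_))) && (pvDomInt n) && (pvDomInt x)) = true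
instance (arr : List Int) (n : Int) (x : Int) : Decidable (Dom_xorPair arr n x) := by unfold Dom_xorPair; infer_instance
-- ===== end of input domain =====

-- B replaces A's hash-set single pass with a plain nested index loop over strictly earlier indices (alternative decomposition, no auxiliary structure).

-- ===== PORT A =====
-- for i in range(0, n): if x ^ arr[i] in s: return True; s.add(arr[i])
-- (the for-loop is transcribed as recursion on the loop counter i)
def xorPairGoA (arr : List Int) (x : Int) (s : PySem.Set Int) (i n : Int) : Bool :=
  if h : i < n then
    match PySem.List.pyGet? arr i with
    | none => false   -- IndexError: excluded by Pre_xorPair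
    | some v =>
      if PySem.Set.contains s (PySem.Int.bxor x v) then true
      else xorPairGoA arr x (PySem.Set.add s v) (i + 1) n
  else false
termination_by (n - i).toNat
decreasing_by omega

def xorPair (arr : List Int) (n : Int) (x : Int) : Bool :=
  xorPairGoA arr x PySem.Set.empty 0 n

-- ===== PORT B =====
-- inner loop: for j in range(i): if arr[i] ^ arr[j] == x: return True
def xorPairInnerB (arr : List Int) (x : Int) (vi : Int) (j i : Int) : Bool :=
  if h : j < i then
    match PySem.List.pyGet? arr j with
    | none => false   -- IndexError: excluded by Pre_xorPair
    | some vj =>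
      if PySem.Int.bxor vi vj == x then true
      else xorPairInnerB arr x vi (j + 1) i
  else false
termination_by (i - j).toNat
decreasing_by omega

-- outer loop: for i in range(n): …
def xorPairOuterB (arr : List Int) (x : Int) (i n : Int) : Bool :=
  if h : i < n then
    match PySem.List.pyGet? arr i with
    | none => false   -- IndexError: excluded by Pre_xorPair
    | some vi =>
      if xorPairInnerB arr x vi 0 i then true
      else xorPairOuterB arr x (i + 1) n
  else false
termination_by (n - i).toNat
decreasing_by omega

def xorPair_alt (arr : List Int) (n : Int) (x : Int) : Bool :=
  xorPairOuterB arr x 0 n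

-- ===== PRECONDITION & SPEC =====
-- Pre_ excludes n > len(arr), on which A raises IndexError unless a matching pair among the
-- first len(arr) elements triggers the early return (then B returns the same True; see cites).
def Pre_xorPair (arr : List Int) (n : Int) (x : Int) : Prop := n ≤ arr.length
instance (arr : List Int) (n : Int) (x : Int) : Decidable (Pre_xorPair arr n x) := by unfold Pre_xorPair; infer_instance

def pvWitness_xorPair : List Int × Int × Int := ([1, 2, 3], 3, 3)

def Spec_xorPair (arr : List Int) (n : Int) (x : Int) (out : Bool) : Prop := out = xorPair_alt arr n x
instance (arr : List Int) (n : Int) (x : Int) (out : Bool) : Decidable (Spec_xorPair arr n x out) := by unfold Spec_xorPair; infer_instance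

-- ===== CLAIM (what is proved, stated in full; the proofs are below) =====
def Claim_equal_xorPair : Prop := ∀ (arr : List Int) (n : Int) (x : Int), Dom_xorPair arr n x → Pre_xorPair arr n x → Spec_xorPair arr n x (xorPair arr n x)

-- ===== LEMMAS AND PROOFS =====

-- Python's a ^ b is self-inverse: a ^ (a ^ b) = b (needed to relate the set lookup to the pair test).
theorem pv_bxor_cancel (a b : Int) : PySem.Int.bxor a (PySem.Int.bxor a b) = b := by
  rcases a with m|m <;> rcases b with n|n <;>
    simp only [PySem.Int.bxor, Int.negSucc_eq] <;>
    split_ifs <;>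
    first
      | omega
      | (simp_all [Nat.xor_xor_cancel_left]; try omega)

theorem pv_bxor_eq_iff (v w x : Int) :
    PySem.Int.bxor v w = x ↔ w = PySem.Int.bxor x v := by
  constructor
  · intro h
    have := pv_bxor_cancel v w
    rw [h] at this
    rw [← this, PySem.Int.bxor_comm v x]
  · intro h
    subst h
    rw [PySem.Int.bxor_comm x v, pv_bxor_cancel]

theorem pv_ofList_append (xs : List Int) (a : Int) :
    PySem.Set.ofList (xs ++ [a]) = PySem.Set.add (PySem.Set.ofList xs) a := by
  simp [PySem.Set.ofList_eq_foldl]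

-- B's inner loop from j to k finds a partner iff some arr[l], j ≤ l < k, xors with v to x.
theorem pv_inner_iff (arr : List Int) (x v : Int) (k : Nat) (hk : k ≤ arr.length) :
    ∀ d j : Nat, j + d = k →
      (xorPairInnerB arr x v (j : Int) (k : Int) = true ↔
        ∃ l : Nat, j ≤ l ∧ l < k ∧ PySem.Int.bxor v (arr.getD l 0) = x) := by
  intro d
  induction d with
  | zero =>
    intro j hj
    obtain rfl : j = k := by omega
    rw [xorPairInnerB, dif_neg (lt_irrefl _)]
    simp only [Bool.false_eq_true, false_iff]
    rintro ⟨l, h1, h2, _⟩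
    omega
  | succ d ih =>
    intro j hj
    have hjk : (j : Int) < (k : Int) := by exact_mod_cast (by omega : j < k)
    have hjl : j < arr.length := by omega
    rw [xorPairInnerB]
    simp only [hjk, dite_true, PySem.List.pyGet?_natCast, List.getElem?_eq_getElem hjl]
    have hgd : arr[j] = arr.getD j 0 := (List.getD_eq_getElem arr 0 hjl).symm
    by_cases hx : (PySem.Int.bxor v arr[j] == x) = true
    · simp only [hx, if_true, true_iff]
      exact ⟨j, le_refl j, by omega, by rw [← hgd]; exact beq_iff_eq.1 hx⟩
    · have hcast : (j : Int) + 1 = ((j + 1 : Nat) : Int) := by push_cast; ring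
      rw [if_neg hx, hcast, ih (j + 1) (by omega)]
      constructor
      · rintro ⟨l, h1, h2, h3⟩
        exact ⟨l, by omega, h2, h3⟩
      · rintro ⟨l, h1, h2, h3⟩
        rcases Nat.eq_or_lt_of_le h1 with rfl | hlt
        · exact absurd (beq_iff_eq.2 (by rw [hgd]; exact h3)) hx
        · exact ⟨l, by omega, h2, h3⟩

-- A's set lookup at step k asks exactly B's inner-loop question.
theorem pv_cond_iff (arr : List Int) (x : Int) (k : Nat) (hk : k < arr.length) :
    PySem.Set.contains (PySem.Set.ofList (arr.take k)) (PySem.Int.bxor x (arr.getD k 0)) = true ↔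
      xorPairInnerB arr x (arr.getD k 0) 0 (k : Int) = true := by
  have hinner := pv_inner_iff arr x (arr.getD k 0) k (Nat.le_of_lt hk) k 0 (by omega)
  rw [Nat.cast_zero] at hinner
  rw [hinner, PySem.Set.contains_iff, PySem.Set.mem_ofList]
  constructor
  · intro h
    obtain ⟨l, hlk, hle⟩ := List.mem_take_iff_getElem.1 h
    have hll : l < arr.length := by omega
    refine ⟨l, Nat.zero_le l, by omega, ?_⟩
    rw [← List.getD_eq_getElem arr 0 hll] at hle
    exact (pv_bxor_eq_iff _ _ _).2 hle
  · rintro ⟨l, _, hlk, hlx⟩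
    have hll : l < arr.length := by omega
    apply List.mem_take_iff_getElem.2
    refine ⟨l, by omega, ?_⟩
    rw [List.getD_eq_getElem arr 0 hll] at hlx
    exact (pv_bxor_eq_iff _ _ _).1 hlx

-- Main loop equivalence: with s = set(arr[:k]), A's remaining pass equals B's remaining pass.
theorem pv_main (arr : List Int) (x : Int) (m : Nat) (hm : m ≤ arr.length) :
    ∀ d k : Nat, k + d = m →
      xorPairGoA arr x (PySem.Set.ofList (arr.take k)) (k : Int) (m : Int) =
        xorPairOuterB arr x (k : Int) (m : Int) := by
  intro d
  induction d with
  | zero =>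
    intro k hk
    subst hk
    rw [xorPairGoA, xorPairOuterB]
    simp
  | succ d ih =>
    intro k hk
    have hklt : (k : Int) < (m : Int) := by exact_mod_cast (by omega : k < m)
    have hkm : k < arr.length := by omega
    have hgd : arr[k] = arr.getD k 0 := (List.getD_eq_getElem arr 0 hkm).symm
    rw [xorPairGoA, xorPairOuterB]
    simp only [hklt, dite_true, PySem.List.pyGet?_natCast, List.getElem?_eq_getElem hkm]
    by_cases hc : PySem.Set.contains (PySem.Set.ofList (arr.take k)) (PySem.Int.bxor x arr[k]) = true
    · have hb : xorPairInnerB arr x arr[k] 0 (k : Int) = true := by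
        rw [hgd]
        exact (pv_cond_iff arr x k hkm).1 (by rw [hgd] at hc; exact hc)
      rw [if_pos hc, if_pos hb]
    · have hc' : PySem.Set.contains (PySem.Set.ofList (arr.take k)) (PySem.Int.bxor x arr[k]) = false := by
        revert hc
        cases PySem.Set.contains (PySem.Set.ofList (arr.take k)) (PySem.Int.bxor x arr[k]) <;> simp
      have hb : xorPairInnerB arr x arr[k] 0 (k : Int) = false := by
        cases hB : xorPairInnerB arr x arr[k] 0 (k : Int)
        · rfl
        · rw [hgd] at hB
          have := (pv_cond_iff arr x k hkm).2 hB
          rw [← hgd] at this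
          exact absurd this hc
      simp only [hc', hb, Bool.false_eq_true, if_false]
      have htake : PySem.Set.add (PySem.Set.ofList (arr.take k)) arr[k] =
          PySem.Set.ofList (arr.take (k + 1)) := by
        rw [List.take_add_one, List.getElem?_eq_getElem hkm, ← pv_ofList_append]
        rfl
      have hcast : (k : Int) + 1 = ((k + 1 : Nat) : Int) := by push_cast; ring
      rw [htake, hcast, ih (k + 1) (by omega)]

-- ===== VERDICT (by name: the statement is the Claim_ definition above) =====
theorem xorPair_spec : Claim_equal_xorPair := by
  intro arr n x _hdom hpre
  unfold Spec_xorPair xorPair xorPair_alt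
  by_cases hn : n ≤ 0
  · rw [xorPairGoA, xorPairOuterB]
    simp only [show ¬((0 : Int) < n) from by omega, dite_false]
  · have hm : n = ((n.toNat : Nat) : Int) := by omega
    have hlen : n.toNat ≤ arr.length := by
      unfold Pre_xorPair at hpre
      omega
    rw [hm]
    have := pv_main arr x n.toNat hlen n.toNat 0 (by omega)
    simpa using this
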